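-- pv_equiv track=rewrite | github.com/ppquadrat/musparql-aligner | run_queries.py | clean_query
-- ===== SOURCE A (Python) =====
-- def clean_query(query: str) -> str:
--     # Drop leading/trailing comment-only lines to avoid endpoint parser quirks.
--     lines = query.splitlines()
--     start = 0
--     while start < len(lines) and (not lines[start].strip() or lines[start].lstrip().startswith("#")):
--         start += 1
--     end = len(lines)
--     while end > start and (not lines[end - 1].strip() or lines[end - 1].lstrip().startswith("#")):
--         end -= 1
--     return "\n".join(lines[start:end]).strip()
-- ===== SOURCE B (Python) =====
-- def _is_content(line):
--     """A line that is neither blank nor a comment-only line."""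
--     return bool(line.strip()) and not line.lstrip().startswith("#")
--
-- def _drop_junk(lines):
--     """Recursively drop leading non-content lines."""
--     if lines and not _is_content(lines[0]):
--         return _drop_junk(lines[1:])
--     return lines
--
-- def clean_query(query: str) -> str:
--     lines = _drop_junk(query.splitlines())
--     core = list(reversed(_drop_junk(list(reversed(lines)))))
--     return "\n".join(core).strip()
-- ===== Notes on version B (the rewrite author's own statement) =====
-- stated objective: simpler
-- what changed: Replaces A's two index-based boundary while-loops and slice with a recursive drop-junk-prefix helper applied twice via list reversal (dropwhile / reverse / dropwhile / reverse), then the same join+strip.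
import Mathlib
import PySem

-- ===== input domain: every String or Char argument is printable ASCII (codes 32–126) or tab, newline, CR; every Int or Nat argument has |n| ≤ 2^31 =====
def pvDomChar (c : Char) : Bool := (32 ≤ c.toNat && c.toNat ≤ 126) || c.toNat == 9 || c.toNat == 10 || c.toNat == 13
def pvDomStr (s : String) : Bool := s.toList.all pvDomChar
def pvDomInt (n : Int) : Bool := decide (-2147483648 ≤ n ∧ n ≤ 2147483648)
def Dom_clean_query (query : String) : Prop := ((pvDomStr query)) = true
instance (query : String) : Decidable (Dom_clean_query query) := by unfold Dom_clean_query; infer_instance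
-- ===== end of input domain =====

-- B trims the leading/trailing comment-or-blank lines by a recursive dropwhile applied
-- twice via reversal, instead of A's two index-based boundary while-loops; objective: simpler.

-- ===== PORT A =====
-- junk line test: `not line.strip() or line.lstrip().startswith("#")`
def pvJunk (l : String) : Bool :=
  PySem.Str.strip l == "" || PySem.Str.startswith (PySem.Str.lstrip l) "#"

-- `while start < len(lines) and junk(lines[start]): start += 1`
def pvFindStart (lines : List String) (start : Nat) : Nat :=
  if h : start < lines.length then
    if pvJunk lines[start] then pvFindStart lines (start + 1) else start
  else start
termination_by lines.length - start

-- `while end > start and junk(lines[end-1]): end -= 1`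
def pvFindEnd (lines : List String) (start e : Nat) : Nat :=
  if e > start then
    if pvJunk (lines.getD (e - 1) "") then pvFindEnd lines start (e - 1) else e
  else e
termination_by e

def clean_query (query : String) : String :=
  let lines := PySem.Str.splitlines query
  let start := pvFindStart lines 0
  let e := pvFindEnd lines start lines.length
  PySem.Str.strip (PySem.Str.join "\n"
    (PySem.List.slice lines (some (start : Int)) (some (e : Int))))

-- ===== PORT B =====
def pvIsContent (l : String) : Bool :=
  !(PySem.Str.strip l == "") && !(PySem.Str.startswith (PySem.Str.lstrip l) "#")

def pvDropJunk (lines : List String) : List String :=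
  match lines with
  | [] => []
  | l :: rest => if !pvIsContent l then pvDropJunk rest else l :: rest

def clean_query_alt (query : String) : String :=
  let lines := pvDropJunk (PySem.Str.splitlines query)
  let core := (pvDropJunk lines.reverse).reverse
  PySem.Str.strip (PySem.Str.join "\n" core)

-- ===== PRECONDITION & SPEC =====
def Spec_clean_query (query : String) (out : String) : Prop := out = clean_query_alt query
instance (query : String) (out : String) : Decidable (Spec_clean_query query out) := by unfold Spec_clean_query; infer_instance

-- ===== CLAIM (what is proved, stated in full; the proofs are below) =====
def Claim_equal_clean_query : Prop := ∀ (query : String), Dom_clean_query query → Spec_clean_query query (clean_query query)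

-- ===== LEMMAS AND PROOFS =====

lemma pvDropJunk_eq_dropWhile (lines : List String) :
    pvDropJunk lines = lines.dropWhile pvJunk := by
  induction lines with
  | nil => rfl
  | cons l rest ih =>
    simp only [pvDropJunk, List.dropWhile]
    have : (!pvIsContent l) = pvJunk l := by
      simp only [pvIsContent, pvJunk]
      cases PySem.Str.strip l == "" <;>
        cases PySem.Str.startswith (PySem.Str.lstrip l) "#" <;> rfl
    rw [this]
    cases pvJunk l <;> simp [ih]

lemma pvFindStart_drop (lines : List String) (s : Nat) (hs : s ≤ lines.length) :
    lines.drop (pvFindStart lines s) = (lines.drop s).dropWhile pvJunk ∧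
      s ≤ pvFindStart lines s ∧ pvFindStart lines s ≤ lines.length := by
  by_cases h : s < lines.length
  · have hdrop : lines.drop s = lines[s] :: lines.drop (s + 1) :=
      List.drop_eq_getElem_cons h
    rw [pvFindStart]
    simp only [dif_pos h]
    by_cases hj : pvJunk lines[s] = true
    · rw [if_pos hj]
      have ih := pvFindStart_drop lines (s + 1) (by omega)
      refine ⟨?_, by omega, ih.2.2⟩
      rw [ih.1, hdrop, List.dropWhile_cons_of_pos hj]
    · rw [if_neg hj]
      refine ⟨?_, le_refl _, le_of_lt h⟩
      rw [hdrop, List.dropWhile_cons_of_neg hj]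
  · have hse : s = lines.length := by omega
    rw [pvFindStart]
    simp only [dif_neg h]
    subst hse
    simp
termination_by lines.length - s

lemma pvFindEnd_take (lines : List String) (s : Nat) :
    ∀ e, e ≤ lines.length → s ≤ e →
    ((lines.drop s).take (pvFindEnd lines s e - s)) =
      (((lines.drop s).take (e - s)).reverse.dropWhile pvJunk).reverse ∧
      s ≤ pvFindEnd lines s e ∧ pvFindEnd lines s e ≤ e := by
  intro e
  induction e with
  | zero =>
    intro _ hse
    have : s = 0 := by omega
    subst this
    rw [pvFindEnd]; simp
  | succ e ih =>
    intro he hse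
    rw [pvFindEnd]
    simp only [Nat.add_sub_cancel]
    by_cases hgt : e + 1 > s
    · rw [if_pos hgt]
      have hlt : e < lines.length := by omega
      have hget : lines.getD e "" = lines[e] := by
        simp [List.getD, List.getElem?_eq_getElem hlt]
      have htake : (lines.drop s).take (e + 1 - s) =
          (lines.drop s).take (e - s) ++ [lines[e]] := by
        have h1 : (lines.drop s).take (e + 1 - s) =
            (lines.drop s).take ((e - s) + 1) := by congr 1; omega
        rw [h1, List.take_add_one]
        have hes : (lines.drop s)[e - s]? = some lines[e] := by
          rw [List.getElem?_drop]
          rw [List.getElem?_eq_getElem (by omega)]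
          congr 1
          congr 1
          omega
        simp [hes]
      by_cases hj : pvJunk lines[e] = true
      · rw [hget, if_pos hj]
        have ihr := ih (by omega) (by omega)
        refine ⟨?_, ihr.2.1, by omega⟩
        rw [ihr.1, htake]
        simp [List.dropWhile_cons_of_pos hj]
      · rw [hget, if_neg hj]
        refine ⟨?_, by omega, le_refl _⟩
        rw [htake]
        simp [List.dropWhile_cons_of_neg hj]
    · rw [if_neg hgt]
      have : s = e + 1 := by omega
      subst this
      simp

lemma pv_core_eq (lines : List String) :
    PySem.List.slice lines (some ((pvFindStart lines 0 : Nat) : Int))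
        (some ((pvFindEnd lines (pvFindStart lines 0) lines.length : Nat) : Int)) =
      (pvDropJunk (pvDropJunk lines).reverse).reverse := by
  have hs := pvFindStart_drop lines 0 (Nat.zero_le _)
  have hsle : pvFindStart lines 0 ≤ lines.length := hs.2.2
  have hdropstart : lines.drop (pvFindStart lines 0) = lines.dropWhile pvJunk := by
    simpa using hs.1
  have he := pvFindEnd_take lines (pvFindStart lines 0) lines.length (le_refl _) hsle
  have hslice := PySem.List.slice_natCast lines (pvFindStart lines 0)
      (pvFindEnd lines (pvFindStart lines 0) lines.length)
  rw [hslice, he.1]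
  have hfull : (lines.drop (pvFindStart lines 0)).take (lines.length - pvFindStart lines 0)
      = lines.drop (pvFindStart lines 0) := by
    apply List.take_of_length_le
    simp
  rw [hfull, hdropstart, pvDropJunk_eq_dropWhile, pvDropJunk_eq_dropWhile]

-- ===== VERDICT (by name: the statement is the Claim_ definition above) =====
theorem clean_query_spec : Claim_equal_clean_query := by
  intro query _
  unfold Spec_clean_query
  show PySem.Str.strip (PySem.Str.join "\n"
      (PySem.List.slice (PySem.Str.splitlines query)
        (some ((pvFindStart (PySem.Str.splitlines query) 0 : Nat) : Int))
        (some ((pvFindEnd (PySem.Str.splitlines query) (pvFindStart (PySem.Str.splitlines query) 0)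
            (PySem.Str.splitlines query).length : Nat) : Int)))) =
    PySem.Str.strip (PySem.Str.join "\n"
      ((pvDropJunk (pvDropJunk (PySem.Str.splitlines query)).reverse).reverse))
  rw [pv_core_eq]
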